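-- pv_equiv track=rewrite | github.com/YaqianQi/Algorithm-and-Data-Structure | Python/Leetcode Daily Practice/Math/5461. Number of Substrings With Only 1s.py | numSub_etl2
-- ===== SOURCE A (Python) =====
-- def numSub_etl2(s):
--     MOD = 10 **9 + 7
--     size = len(s)
--     dp = [0] * (size + 1)
--     res = 0
--     j = 0
--     i = 0
--     while i < len(s):
--         if s[i] == '1':
--             res += 1
--             start = i
--             while start + 1 <size and s[start+1] == '1':
--                 start += 1
--                 res += 1
--         i+= 1
--     return res % MOD
-- ===== SOURCE B (Python) =====
-- def numSub_etl2(s):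
--     MOD = 10 ** 9 + 7
--     run = 0
--     res = 0
--     for c in s:
--         run = run + 1 if c == '1' else 0
--         res += run
--     return res % MOD
-- ===== Notes on version B (the rewrite author's own statement) =====
-- stated objective: faster
-- what changed: Replaced the index-based outer loop that rescans each run of ones for every one-character (quadratic) with a single pass keeping the current run length and adding it at each step.
import Mathlib
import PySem

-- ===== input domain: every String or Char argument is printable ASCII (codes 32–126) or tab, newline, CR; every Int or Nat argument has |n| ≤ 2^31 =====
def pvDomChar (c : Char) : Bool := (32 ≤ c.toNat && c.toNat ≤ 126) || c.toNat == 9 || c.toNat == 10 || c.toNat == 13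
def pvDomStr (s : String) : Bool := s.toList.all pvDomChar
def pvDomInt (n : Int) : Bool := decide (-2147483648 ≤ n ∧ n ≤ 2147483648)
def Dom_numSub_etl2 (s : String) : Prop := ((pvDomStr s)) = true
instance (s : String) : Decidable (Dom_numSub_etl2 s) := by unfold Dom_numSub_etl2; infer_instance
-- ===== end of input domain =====

-- B: one pass keeping the current run length of ones, adding it at each step (asymptotically faster than A, which rescans the rest of the run at each one-character).
-- ===== PORT A =====
-- inner while: 'while start+1 < size and s[start+1]=="1": start+=1; res+=1' — scans the consecutive '1's after the current position
def numSub_etl2_inner : List Char → Int → Int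
  | c :: rest, res => if c = '1' then numSub_etl2_inner rest (res + 1) else res
  | [], res => res

-- outer while: i advances by exactly one each iteration; 'rest' is the suffix after position i
def numSub_etl2_outer : List Char → Int → Int
  | c :: rest, res =>
      numSub_etl2_outer rest (if c = '1' then numSub_etl2_inner rest (res + 1) else res)
  | [], res => res

def numSub_etl2 (s : String) : Int :=
  PySem.Int.mod (numSub_etl2_outer s.toList 0) (10 ^ 9 + 7)

-- ===== PORT B =====
def numSub_etl2_altGo : List Char → Int → Int → Int
  | c :: rest, run, res =>
      let run' := if c = '1' then run + 1 else 0
      numSub_etl2_altGo rest run' (res + run')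
  | [], _, res => res

def numSub_etl2_alt (s : String) : Int :=
  PySem.Int.mod (numSub_etl2_altGo s.toList 0 0) (10 ^ 9 + 7)

-- ===== PRECONDITION & SPEC =====
def Spec_numSub_etl2 (s : String) (out : Int) : Prop := out = numSub_etl2_alt s
instance (s : String) (out : Int) : Decidable (Spec_numSub_etl2 s out) := by unfold Spec_numSub_etl2; infer_instance

-- ===== CLAIM (what is proved, stated in full; the proofs are below) =====
def Claim_equal_numSub_etl2 : Prop := ∀ (s : String), Dom_numSub_etl2 s → Spec_numSub_etl2 s (numSub_etl2 s)

-- ===== LEMMAS AND PROOFS =====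

lemma inner_shift (cs : List Char) (res : Int) :
    numSub_etl2_inner cs res = res + numSub_etl2_inner cs 0 := by
  induction cs generalizing res with
  | nil => simp [numSub_etl2_inner]
  | cons c rest ih =>
      simp only [numSub_etl2_inner]
      split_ifs
      · simp only [zero_add]
        rw [ih (res + 1), ih 1]; ring_nf
      · ring_nf

lemma outer_shift (cs : List Char) (res : Int) :
    numSub_etl2_outer cs res = res + numSub_etl2_outer cs 0 := by
  induction cs generalizing res with
  | nil => simp [numSub_etl2_outer]
  | cons c rest ih =>
      simp only [numSub_etl2_outer]
      split_ifs
      · simp only [zero_add]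
        rw [ih (numSub_etl2_inner rest (res + 1)), ih (numSub_etl2_inner rest 1),
            inner_shift rest (res + 1), inner_shift rest 1]
        ring_nf
      · rw [ih res]

lemma altGo_shift (cs : List Char) (run res : Int) :
    numSub_etl2_altGo cs run res
      = res + run * numSub_etl2_inner cs 0 + numSub_etl2_altGo cs 0 0 := by
  induction cs generalizing run res with
  | nil => simp [numSub_etl2_altGo, numSub_etl2_inner]
  | cons c rest ih =>
      simp only [numSub_etl2_altGo, numSub_etl2_inner]
      split_ifs
      · simp only [zero_add]
        rw [ih (run + 1) (res + (run + 1)), ih 1 1,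
            inner_shift rest 1]
        ring_nf
      · rw [ih 0 (res + 0), ih 0 0]
        ring_nf

lemma go_eq (cs : List Char) :
    numSub_etl2_outer cs 0 = numSub_etl2_altGo cs 0 0 := by
  induction cs with
  | nil => simp [numSub_etl2_outer, numSub_etl2_altGo]
  | cons c rest ih =>
      simp only [numSub_etl2_outer, numSub_etl2_altGo]
      split_ifs
      · simp only [zero_add]
        rw [outer_shift rest (numSub_etl2_inner rest 1), inner_shift rest 1,
            altGo_shift rest 1 1, ih]
        ring_nf
      · rw [ih]; ring_nf

-- ===== VERDICT =====
theorem numSub_etl2_spec : Claim_equal_numSub_etl2 := by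
  intro s _
  unfold Spec_numSub_etl2 numSub_etl2 numSub_etl2_alt
  rw [go_eq]
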